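-- pv_equiv track=rewrite | github.com/samuelvnimwegen/Code-Theory-2024-25 | playfair/utils/preconditions.py | keyword_no_double_letter
-- ===== SOURCE A (Python) =====
-- def keyword_no_double_letter(keyword: str) -> bool:
--     """
--     Check that the keyword does not contain repeated letters
--     :return: true/false
--     """
--     keyword_upper = keyword.upper()
--     seen = set()
--     for letter in keyword_upper:
--         if letter in seen:
--             return False
--         seen.add(letter)
--     return True
-- ===== SOURCE B (Python) =====
-- def keyword_no_double_letter(keyword: str) -> bool:
--     """
--     Check that the keyword does not contain repeated letters
--     :return: true/false
--     """
--     chars = sorted(keyword.upper())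
--     for prev, cur in zip(chars, chars[1:]):
--         if cur == prev:
--             return False
--     return True
-- ===== Notes on version B (the rewrite author's own statement) =====
-- stated objective: alternative
-- what changed: B sorts the uppercased characters and rejects on any equal adjacent pair, instead of A's single pass maintaining a seen-set with membership tests.
import Mathlib
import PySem

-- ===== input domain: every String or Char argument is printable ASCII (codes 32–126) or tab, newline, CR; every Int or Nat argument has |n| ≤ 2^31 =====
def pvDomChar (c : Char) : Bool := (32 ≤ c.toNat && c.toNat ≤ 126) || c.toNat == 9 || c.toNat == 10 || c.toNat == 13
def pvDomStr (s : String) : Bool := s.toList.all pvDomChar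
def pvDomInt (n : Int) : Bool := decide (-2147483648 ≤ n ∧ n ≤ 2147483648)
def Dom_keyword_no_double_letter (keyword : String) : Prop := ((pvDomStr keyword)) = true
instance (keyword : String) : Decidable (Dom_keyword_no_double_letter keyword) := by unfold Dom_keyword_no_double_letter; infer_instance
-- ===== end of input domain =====

-- B detects duplicates by sorting so equal letters become adjacent, instead of A's running seen-set; same result, alternative algorithm.

-- ===== PORT A =====
-- the 'for letter in keyword_upper' loop with early return False, carrying the growing 'seen' set
def kndlLoopA : List Char → PySem.Set Char → Bool
  | [], _ => true
  | letter :: rest, seen =>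
      if PySem.Set.contains seen letter then false
      else kndlLoopA rest (PySem.Set.add seen letter)

def keyword_no_double_letter (keyword : String) : Bool :=
  kndlLoopA (PySem.Str.upper keyword).toList PySem.Set.empty

-- ===== PORT B =====
-- the 'for prev, cur in zip(chars, chars[1:])' loop: walk adjacent pairs of the sorted list
def kndlLoopB : List Char → Bool
  | prev :: cur :: rest => if cur == prev then false else kndlLoopB (cur :: rest)
  | _ => true

def keyword_no_double_letter_alt (keyword : String) : Bool :=
  kndlLoopB (PySem.List.sorted (PySem.Str.upper keyword).toList (fun x => x) false)

-- ===== PRECONDITION & SPEC =====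
def Spec_keyword_no_double_letter (keyword : String) (out : Bool) : Prop := out = keyword_no_double_letter_alt keyword
instance (keyword : String) (out : Bool) : Decidable (Spec_keyword_no_double_letter keyword out) := by unfold Spec_keyword_no_double_letter; infer_instance

-- ===== CLAIM (what is proved, stated in full; the proofs are below) =====
def Claim_equal_keyword_no_double_letter : Prop := ∀ (keyword : String), Dom_keyword_no_double_letter keyword → Spec_keyword_no_double_letter keyword (keyword_no_double_letter keyword)

-- ===== LEMMAS AND PROOFS =====

-- A's loop succeeds iff the remaining letters are pairwise distinct and none was already seen
theorem kndlLoopA_eq_true_iff (l : List Char) (seen : PySem.Set Char) :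
    kndlLoopA l seen = true ↔ l.Nodup ∧ ∀ c ∈ l, c ∉ seen := by
  induction l generalizing seen with
  | nil => simp [kndlLoopA]
  | cons a rest ih =>
      simp only [kndlLoopA]
      by_cases h : a ∈ seen
      · rw [if_pos (by simpa using h)]
        simp only [Bool.false_eq_true, false_iff, not_and]
        intro _ hall
        exact (hall a (List.mem_cons_self ..)) h
      · rw [if_neg (by simpa using h)]
        rw [ih, List.nodup_cons]
        constructor
        · rintro ⟨hnd, hall⟩
          refine ⟨⟨fun hmem => ?_, hnd⟩, ?_⟩
          · have := hall a hmem
            simp [PySem.Set.mem_add] at this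
          · intro c hc
            rcases List.mem_cons.mp hc with heq | hc'
            · exact heq ▸ h
            · have := hall c hc'
              simp only [PySem.Set.mem_add] at this
              push Not at this
              exact this.1
        · rintro ⟨⟨hna, hnd⟩, hall⟩
          refine ⟨hnd, fun c hc => ?_⟩
          simp only [PySem.Set.mem_add]
          push Not
          refine ⟨hall c (List.mem_cons_of_mem _ hc), fun hce => ?_⟩
          exact hna (hce ▸ hc)

-- on a (≤)-sorted list, B's adjacent-pair scan succeeds iff the list has no duplicates
theorem kndlLoopB_sorted_iff_nodup (l : List Char) (hs : l.Pairwise (· ≤ ·)) :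
    kndlLoopB l = true ↔ l.Nodup := by
  induction l with
  | nil => simp [kndlLoopB]
  | cons a rest ih =>
      cases rest with
      | nil => simp [kndlLoopB]
      | cons b t =>
          rw [List.pairwise_cons] at hs
          obtain ⟨ha, hp⟩ := hs
          simp only [kndlLoopB]
          by_cases h : b = a
          · rw [if_pos (by simp [h])]
            simp only [Bool.false_eq_true, false_iff]
            intro hnd
            exact (List.nodup_cons.mp hnd).1 (h ▸ List.mem_cons_self ..)
          · rw [if_neg (by simp [h]), ih hp]
            have hnotmem : a ∉ b :: t := by
              intro hmem
              rcases List.mem_cons.mp hmem with heq | hmem'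
              · exact h heq.symm
              · have hba : b ≤ a := (List.pairwise_cons.mp hp).1 a hmem'
                have hab : a ≤ b := ha b (List.mem_cons_self ..)
                exact h (le_antisymm hba hab)
            rw [List.nodup_cons (a := a)]
            exact ⟨fun hnd => ⟨hnotmem, hnd⟩, fun hnd => hnd.2⟩

theorem both_eq_nodup (keyword : String) :
    keyword_no_double_letter keyword = keyword_no_double_letter_alt keyword := by
  unfold keyword_no_double_letter keyword_no_double_letter_alt
  set l := (PySem.Str.upper keyword).toList with hl
  have hperm : (PySem.List.sorted l (fun x => x) false).Perm l := PySem.List.sorted_perm ..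
  have hpw : (PySem.List.sorted l (fun x => x) false).Pairwise (· ≤ ·) := by
    simpa using PySem.List.sorted_pairwise l (fun x => x)
  have hA : kndlLoopA l PySem.Set.empty = true ↔ l.Nodup := by
    rw [kndlLoopA_eq_true_iff]
    simp [PySem.Set.empty]
  have hB : kndlLoopB (PySem.List.sorted l (fun x => x) false) = true ↔ l.Nodup := by
    rw [kndlLoopB_sorted_iff_nodup _ hpw, hperm.nodup_iff]
  exact Bool.eq_iff_iff.mpr (hA.trans hB.symm)

-- ===== VERDICT (by name: the statement is the Claim_ definition above) =====
theorem keyword_no_double_letter_spec : Claim_equal_keyword_no_double_letter := by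
  intro keyword _
  unfold Spec_keyword_no_double_letter
  exact both_eq_nodup keyword
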